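-- pv_equiv track=rewrite | github.com/AndrewSukhobok95/NLP_HSE_school | sentiframes_proc.py | update
-- ===== SOURCE A (Python) =====
-- def update(A, A1, A2, A3, A4, lst1, lemma_child1):
--     lst = A
--     for i in range(5):
--         if A1 != None and i < len(A1):
--             s = A1[i][1:len(A1[i])-1].split()
--             if len(set(s)&set(lst1)) > 1:
--                 lst[0] = lemma_child1
--
--         if A2 != None and i < len(A2):
--             s = A2[i][1:len(A2[i])-1].split()
--             if len(set(s)&set(lst1)) > 1:
--                 lst[1] = lemma_child1
--
--         if A3 != None and i < len(A3):
--             s = A3[i][1:len(A3[i])-1].split()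
--             if len(set(s)&set(lst1)) > 1:
--                 lst[2] = lemma_child1
--
--         if A4 != None and i < len(A4):
--             s = A4[i][1:len(A4[i])-1].split()
--             if len(set(s)&set(lst1)) > 1:
--                 lst[3] = lemma_child1
--     return lst
-- ===== SOURCE B (Python) =====
-- def update(A, A1, A2, A3, A4, lst1, lemma_child1):
--     wset = set(lst1)
--
--     def has_two_common(x):
--         # stream the words of x[1:-1]: true as soon as two DISTINCT words of wset occur
--         first = None
--         for w in x[1:len(x) - 1].split():
--             if w in wset:
--                 if first is None:
--                     first = w
--                 elif w != first:
--                     return True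
--         return False
--
--     def slot_hit(Ax):
--         return Ax is not None and any(has_two_common(x) for x in Ax[:5])
--
--     hits = (slot_hit(A1), slot_hit(A2), slot_hit(A3), slot_hit(A4))
--     A[:] = [lemma_child1 if j < 4 and hits[j] else v for j, v in enumerate(A)]
--     return A
-- ===== Notes on version B (the rewrite author's own statement) =====
-- stated objective: alternative
-- what changed: B never builds or intersects word sets and never writes inside the scan: it detects 'two distinct common words' by a streaming one-variable scan over each bracketed string's words (early exit on the second distinct hit), computes one boolean flag per slot in a staged pass, and then rebuilds the list in a single comprehension, instead of A's five-iteration loop that re-materialises set(s)&set(lst1) and mutates slots in place on every iteration. (measured constant-factor speedup: set(lst1) built once and early exit on the second distinct hit).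
import Mathlib
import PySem

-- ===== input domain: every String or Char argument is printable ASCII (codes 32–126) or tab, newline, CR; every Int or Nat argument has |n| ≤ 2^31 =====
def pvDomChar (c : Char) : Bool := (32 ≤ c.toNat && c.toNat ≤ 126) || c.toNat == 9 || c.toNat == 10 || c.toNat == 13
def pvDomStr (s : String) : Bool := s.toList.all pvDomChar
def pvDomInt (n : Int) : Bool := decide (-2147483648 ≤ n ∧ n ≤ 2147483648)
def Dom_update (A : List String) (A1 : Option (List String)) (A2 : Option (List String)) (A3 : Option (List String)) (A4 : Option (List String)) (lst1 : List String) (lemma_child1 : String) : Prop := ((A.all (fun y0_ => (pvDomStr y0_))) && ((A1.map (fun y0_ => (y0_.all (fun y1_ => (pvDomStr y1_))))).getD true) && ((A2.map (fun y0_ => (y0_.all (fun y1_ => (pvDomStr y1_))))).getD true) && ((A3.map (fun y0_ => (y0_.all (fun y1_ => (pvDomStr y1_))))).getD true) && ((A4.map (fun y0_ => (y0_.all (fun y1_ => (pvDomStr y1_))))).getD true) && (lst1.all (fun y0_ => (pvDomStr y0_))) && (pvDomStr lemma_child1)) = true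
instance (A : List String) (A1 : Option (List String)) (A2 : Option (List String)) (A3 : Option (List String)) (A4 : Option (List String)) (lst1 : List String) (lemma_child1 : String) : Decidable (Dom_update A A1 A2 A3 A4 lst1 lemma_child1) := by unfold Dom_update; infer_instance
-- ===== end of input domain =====

-- B detects 'two distinct common words' by a streaming one-variable scan with early exit
-- (never building or intersecting word sets), computes one boolean flag per slot in a staged
-- pass, and rebuilds the list in one guarded comprehension instead of A's five-iteration loop
-- of set intersections and in-place slot writes (objective: alternative). Both Pythons update
-- the argument list A in place and return it; the equivalence proved here is about the return value.

-- ===== PORT A =====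
-- len(set(s) & set(lst1)) > 1 for s = x[1:len(x)-1].split()  (A builds set(lst1) anew each time)
def pvCondA (x : String) (lst1 : List String) : Bool :=
  let s := PySem.Chars.split₀ (PySem.List.slice x.toList (some 1) (some ((x.toList.length : Int) - 1)))
  decide (1 < PySem.Set.len (PySem.Set.inter (PySem.Set.ofList s) (PySem.Set.ofList (lst1.map String.toList))))

-- "Aj != None and i < len(Aj)" guard plus the inner overlap test, at loop index i
def pvTry (Ax : Option (List String)) (lst1 : List String) (i : Int) : Bool :=
  match Ax with
  | none => false
  | some l => decide (i < (l.length : Int)) && pvCondA (PySem.List.pyGetD l i "") lst1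

def update (A : List String) (A1 : Option (List String)) (A2 : Option (List String)) (A3 : Option (List String)) (A4 : Option (List String)) (lst1 : List String) (lemma_child1 : String) : List String :=
  (PySem.List.pyRange 0 5 1).foldl (fun lst i =>
    let lst := if pvTry A1 lst1 i then PySem.List.pySetD lst 0 lemma_child1 else lst
    let lst := if pvTry A2 lst1 i then PySem.List.pySetD lst 1 lemma_child1 else lst
    let lst := if pvTry A3 lst1 i then PySem.List.pySetD lst 2 lemma_child1 else lst
    let lst := if pvTry A4 lst1 i then PySem.List.pySetD lst 3 lemma_child1 else lst
    lst) A

-- ===== PORT B =====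
-- the 'for w in …: if w in wset: …' streaming loop of has_two_common, with its early return
def pvScanTwo (wset : PySem.Set (List Char)) : List (List Char) → Option (List Char) → Bool
  | [], _ => false
  | w :: rest, first =>
    if PySem.Set.contains wset w then
      match first with
      | none => pvScanTwo wset rest (some w)
      | some f => if w ≠ f then true else pvScanTwo wset rest (some f)
    else pvScanTwo wset rest first

-- has_two_common(x): stream the words of x[1:len(x)-1], first := None
def pvHasTwoCommon (wset : PySem.Set (List Char)) (x : String) : Bool :=
  pvScanTwo wset (PySem.Chars.split₀ (PySem.List.slice x.toList (some 1) (some ((x.toList.length : Int) - 1)))) none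

-- slot_hit(Ax) = Ax is not None and any(has_two_common(x) for x in Ax[:5])
def pvSlotHitB (wset : PySem.Set (List Char)) (Ax : Option (List String)) : Bool :=
  match Ax with
  | none => false
  | some l => (PySem.List.slice l none (some 5)).any (pvHasTwoCommon wset)

-- hits[j] for j = 0..3 (the comprehension guards with j < 4 first)
def pvHitSel (h : Bool × Bool × Bool × Bool) (j : Int) : Bool :=
  if j = 0 then h.1 else if j = 1 then h.2.1 else if j = 2 then h.2.2.1 else h.2.2.2

def update_alt (A : List String) (A1 : Option (List String)) (A2 : Option (List String)) (A3 : Option (List String)) (A4 : Option (List String)) (lst1 : List String) (lemma_child1 : String) : List String :=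
  let wset := PySem.Set.ofList (lst1.map String.toList)
  let hits := (pvSlotHitB wset A1, pvSlotHitB wset A2, pvSlotHitB wset A3, pvSlotHitB wset A4)
  (PySem.List.enumerate A 0).map (fun p =>
    if decide (p.1 < 4) && pvHitSel hits p.1 then lemma_child1 else p.2)

-- ===== PRECONDITION & SPEC =====
-- slot j receives a write iff some of the first five entries of Aj has word overlap > 1 with lst1
def pvSlotHit (Ax : Option (List String)) (lst1 : List String) : Bool :=
  match Ax with
  | none => false
  | some l => (l.take 5).any (fun x =>
      decide (1 < PySem.Set.len (PySem.Set.inter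
        (PySem.Set.ofList (PySem.Chars.split₀ (PySem.List.slice x.toList (some 1) (some ((x.toList.length : Int) - 1)))))
        (PySem.Set.ofList (lst1.map String.toList)))))

-- Pre_ excludes exactly the inputs on which Python A raises IndexError: a slot j ∈ {0,1,2,3}
-- whose word-overlap test fires while the list A is shorter than j+1.
def Pre_update (A : List String) (A1 : Option (List String)) (A2 : Option (List String)) (A3 : Option (List String)) (A4 : Option (List String)) (lst1 : List String) (lemma_child1 : String) : Prop :=
  (pvSlotHit A1 lst1 = true → 0 < A.length) ∧
  (pvSlotHit A2 lst1 = true → 1 < A.length) ∧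
  (pvSlotHit A3 lst1 = true → 2 < A.length) ∧
  (pvSlotHit A4 lst1 = true → 3 < A.length)
instance (A : List String) (A1 : Option (List String)) (A2 : Option (List String)) (A3 : Option (List String)) (A4 : Option (List String)) (lst1 : List String) (lemma_child1 : String) : Decidable (Pre_update A A1 A2 A3 A4 lst1 lemma_child1) := by unfold Pre_update; infer_instance

def pvWitness_update : List String × Option (List String) × Option (List String) × Option (List String) × Option (List String) × List String × String :=
  (["a", "b", "c", "d"], some ["(x y)"], none, some ["(p q)"], none, ["x", "y"], "LC")

def Spec_update (A : List String) (A1 : Option (List String)) (A2 : Option (List String)) (A3 : Option (List String)) (A4 : Option (List String)) (lst1 : List String) (lemma_child1 : String) (out : List String) : Prop := out = update_alt A A1 A2 A3 A4 lst1 lemma_child1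
instance (A : List String) (A1 : Option (List String)) (A2 : Option (List String)) (A3 : Option (List String)) (A4 : Option (List String)) (lst1 : List String) (lemma_child1 : String) (out : List String) : Decidable (Spec_update A A1 A2 A3 A4 lst1 lemma_child1 out) := by unfold Spec_update; infer_instance

-- ===== CLAIM (what is proved, stated in full; the proofs are below) =====
def Claim_equal_update : Prop := ∀ (A : List String) (A1 : Option (List String)) (A2 : Option (List String)) (A3 : Option (List String)) (A4 : Option (List String)) (lst1 : List String) (lemma_child1 : String), Dom_update A A1 A2 A3 A4 lst1 lemma_child1 → Pre_update A A1 A2 A3 A4 lst1 lemma_child1 → Spec_update A A1 A2 A3 A4 lst1 lemma_child1 (update A A1 A2 A3 A4 lst1 lemma_child1)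
-- ===== LEMMAS AND PROOFS =====

-- conditional write of v at slot j ("lst[j] = v if b")
def pvW (j : Nat) (v : String) (b : Bool) (l : List String) : List String :=
  if b then PySem.List.pySetD l (j : Int) v else l

theorem pvW_same (j : Nat) (v : String) (b b' : Bool) (l : List String) :
    pvW j v b (pvW j v b' l) = pvW j v (b' || b) l := by
  cases b <;> cases b' <;>
    simp [pvW, PySem.List.pySetD_natCast, List.set_set]

theorem pvW_comm (j k : Nat) (h : j ≠ k) (v : String) (b b' : Bool) (l : List String) :
    pvW j v b (pvW k v b' l) = pvW k v b' (pvW j v b l) := by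
  cases b <;> cases b' <;>
    simp [pvW, PySem.List.pySetD_natCast, List.set_comm v v h]

theorem pvW_absorb (v : String) (b0 b1 b2 b3 c0 c1 c2 c3 : Bool) (A : List String) :
    pvW 3 v b3 (pvW 2 v b2 (pvW 1 v b1 (pvW 0 v b0
      (pvW 3 v c3 (pvW 2 v c2 (pvW 1 v c1 (pvW 0 v c0 A))))))) =
    pvW 3 v (c3 || b3) (pvW 2 v (c2 || b2) (pvW 1 v (c1 || b1) (pvW 0 v (c0 || b0) A))) := by
  rw [pvW_comm 0 3 (by omega), pvW_comm 0 2 (by omega), pvW_comm 0 1 (by omega), pvW_same 0,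
      pvW_comm 1 3 (by omega), pvW_comm 1 2 (by omega), pvW_same 1,
      pvW_comm 2 3 (by omega), pvW_same 2, pvW_same 3]

theorem foldl_step_eq (A1 A2 A3 A4 : Option (List String)) (lst1 : List String) (lc : String) :
    ∀ (is : List Int) (A : List String),
    is.foldl (fun lst i =>
      let lst := if pvTry A1 lst1 i then PySem.List.pySetD lst 0 lc else lst
      let lst := if pvTry A2 lst1 i then PySem.List.pySetD lst 1 lc else lst
      let lst := if pvTry A3 lst1 i then PySem.List.pySetD lst 2 lc else lst
      let lst := if pvTry A4 lst1 i then PySem.List.pySetD lst 3 lc else lst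
      lst) A =
      pvW 3 lc (is.any (pvTry A4 lst1))
        (pvW 2 lc (is.any (pvTry A3 lst1))
          (pvW 1 lc (is.any (pvTry A2 lst1))
            (pvW 0 lc (is.any (pvTry A1 lst1)) A)))
  | [], A => by simp [pvW]
  | i :: is, A => by
    rw [List.foldl_cons, foldl_step_eq A1 A2 A3 A4 lst1 lc is]
    show pvW 3 lc (is.any (pvTry A4 lst1))
        (pvW 2 lc (is.any (pvTry A3 lst1))
          (pvW 1 lc (is.any (pvTry A2 lst1))
            (pvW 0 lc (is.any (pvTry A1 lst1))
              (pvW 3 lc (pvTry A4 lst1 i)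
                (pvW 2 lc (pvTry A3 lst1 i)
                  (pvW 1 lc (pvTry A2 lst1 i)
                    (pvW 0 lc (pvTry A1 lst1 i) A))))))) = _
    rw [pvW_absorb]
    simp [List.any_cons]

theorem update_eq_W (A : List String) (A1 A2 A3 A4 : Option (List String)) (lst1 : List String) (lc : String) :
    update A A1 A2 A3 A4 lst1 lc =
      pvW 3 lc ((PySem.List.pyRange 0 5 1).any (pvTry A4 lst1))
        (pvW 2 lc ((PySem.List.pyRange 0 5 1).any (pvTry A3 lst1))
          (pvW 1 lc ((PySem.List.pyRange 0 5 1).any (pvTry A2 lst1))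
            (pvW 0 lc ((PySem.List.pyRange 0 5 1).any (pvTry A1 lst1)) A))) := by
  rw [update, foldl_step_eq]

theorem any_range_eq_any_take (l : List String) (f : String → Bool) :
    (PySem.List.pyRange 0 5 1).any (fun i => decide (i < (l.length : Int)) && f (PySem.List.pyGetD l i "")) =
      (l.take 5).any f := by
  have h5 : PySem.List.pyRange 0 5 1 = [0, 1, 2, 3, 4] := by decide
  rw [h5]
  rcases l with _ | ⟨a, _ | ⟨b, _ | ⟨c, _ | ⟨d, _ | ⟨e, t⟩⟩⟩⟩⟩ <;>
    simp [PySem.List.pyGetD, PySem.List.pyGet?, PySem.List.pyIdx?, List.any_cons,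
      show ∀ m : ℕ, ((0:Int) ≤ (m:Int) + 1) from by omega,
      show ∀ m : ℕ, ((0:Int) ≤ (m:Int) + 1 + 1) from by omega,
      show ∀ m : ℕ, ((0:Int) ≤ (m:Int) + 1 + 1 + 1) from by omega,
      show ∀ m : ℕ, ((0:Int) ≤ (m:Int) + 1 + 1 + 1 + 1) from by omega,
      show ∀ m : ℕ, ((1:Int) ≤ (m:Int) + 1) from by omega,
      show ∀ m : ℕ, ((2:Int) ≤ (m:Int) + 1 + 1 + 1 + 1) from by omega,
      show ∀ m : ℕ, ((3:Int) ≤ (m:Int) + 1 + 1 + 1 + 1) from by omega,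
      show ∀ m : ℕ, ((4:Int) ≤ (m:Int) + 1 + 1 + 1 + 1) from by omega]

theorem any_try_eq_slotHit (Ax : Option (List String)) (lst1 : List String) :
    (PySem.List.pyRange 0 5 1).any (pvTry Ax lst1) = pvSlotHit Ax lst1 := by
  cases Ax with
  | none => simp [pvTry, pvSlotHit]
  | some l =>
    have hf : pvTry (some l) lst1 = fun i =>
        decide (i < (l.length : Int)) && pvCondA (PySem.List.pyGetD l i "") lst1 := rfl
    have h2 := any_range_eq_any_take l (fun x => pvCondA x lst1)
    rw [hf]
    simp only [h2]
    simp [pvSlotHit, pvCondA]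

-- ----- B-side lemmas -----

theorem pvScanTwo_some (wset : PySem.Set (List Char)) (ws : List (List Char)) (f : List Char) :
    pvScanTwo wset ws (some f) = ws.any (fun w => PySem.Set.contains wset w && w ≠ f) := by
  induction ws with
  | nil => rfl
  | cons w rest ih =>
    by_cases hc : w ∈ wset <;> by_cases hf : w = f <;>
      simp [pvScanTwo, hc, hf, ih, PySem.Set.contains_eq_listContains]

theorem pvScanTwo_none (wset : PySem.Set (List Char)) (ws : List (List Char)) :
    pvScanTwo wset ws none = true ↔ ∃ a ∈ ws, ∃ b ∈ ws, a ∈ wset ∧ b ∈ wset ∧ a ≠ b := by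
  induction ws with
  | nil => simp [pvScanTwo]
  | cons w rest ih =>
    by_cases hc : w ∈ wset
    · rw [show pvScanTwo wset (w :: rest) none = pvScanTwo wset rest (some w) by
        simp [pvScanTwo, hc, PySem.Set.contains_eq_listContains]]
      rw [pvScanTwo_some]
      constructor
      · intro h
        simp only [List.any_eq_true, Bool.and_eq_true, decide_eq_true_eq, ne_eq,
          PySem.Set.contains_eq_listContains, List.contains_eq_mem] at h
        obtain ⟨b, hb, hbs, hne⟩ := h
        exact ⟨w, by simp, b, by simp [hb], hc, hbs, fun he => hne (he ▸ rfl)⟩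
      · rintro ⟨a, ha, b, hb, has, hbs, hne⟩
        simp only [List.any_eq_true, Bool.and_eq_true, decide_eq_true_eq, ne_eq,
          PySem.Set.contains_eq_listContains, List.contains_eq_mem]
        simp only [List.mem_cons] at ha hb
        rcases ha with rfl | ha
        · rcases hb with rfl | hb
          · exact absurd rfl hne
          · exact ⟨b, hb, hbs, fun h => hne h.symm⟩
        · rcases hb with rfl | hb
          · exact ⟨a, ha, has, fun h => hne h⟩
          · by_cases haw : a = w
            · exact ⟨b, hb, hbs, fun h => hne (haw.trans h.symm)⟩
            · exact ⟨a, ha, has, fun h => haw h⟩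
    · rw [show pvScanTwo wset (w :: rest) none = pvScanTwo wset rest none by
        simp [pvScanTwo, hc, PySem.Set.contains_eq_listContains]]
      rw [ih]
      constructor
      · rintro ⟨a, ha, b, hb, h⟩; exact ⟨a, by simp [ha], b, by simp [hb], h⟩
      · rintro ⟨a, ha, b, hb, has, hbs, hne⟩
        simp only [List.mem_cons] at ha hb
        rcases ha with rfl | ha
        · exact absurd has hc
        rcases hb with rfl | hb
        · exact absurd hbs hc
        exact ⟨a, ha, b, hb, has, hbs, hne⟩

theorem nodup_two (l : List (List Char)) (h : l.Nodup) : 1 < l.length ↔ ∃ a ∈ l, ∃ b ∈ l, a ≠ b := by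
  match l, h with
  | [], _ => simp
  | [a], _ => simp
  | a :: b :: t, h =>
    constructor
    · intro _; exact ⟨a, by simp, b, by simp, by simp at h; tauto⟩
    · intro _; simp

theorem stream_eq_card (wset : PySem.Set (List Char)) (ws : List (List Char)) :
    pvScanTwo wset ws none = decide (1 < PySem.Set.len (PySem.Set.inter (PySem.Set.ofList ws) wset)) := by
  rw [Bool.eq_iff_iff, pvScanTwo_none, decide_eq_true_iff]
  have hnd : (PySem.Set.inter (PySem.Set.ofList ws) wset).Nodup :=
    PySem.Set.nodup_inter _ _ (PySem.Set.nodup_ofList ws)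
  have hlen : PySem.Set.len (PySem.Set.inter (PySem.Set.ofList ws) wset)
      = ((PySem.Set.inter (PySem.Set.ofList ws) wset).length : Int) := rfl
  rw [hlen]
  rw [show (1 < ((PySem.Set.inter (PySem.Set.ofList ws) wset).length : Int)) ↔
      1 < (PySem.Set.inter (PySem.Set.ofList ws) wset).length from by exact_mod_cast Iff.rfl]
  rw [nodup_two _ hnd]
  constructor
  · rintro ⟨a, ha, b, hb, has, hbs, hne⟩
    exact ⟨a, (PySem.Set.mem_inter _ _ _).mpr ⟨(PySem.Set.mem_ofList _ _).mpr ha, has⟩,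
           b, (PySem.Set.mem_inter _ _ _).mpr ⟨(PySem.Set.mem_ofList _ _).mpr hb, hbs⟩, hne⟩
  · rintro ⟨a, ha, b, hb, hne⟩
    rw [PySem.Set.mem_inter] at ha hb
    exact ⟨a, (PySem.Set.mem_ofList _ _).mp ha.1, b, (PySem.Set.mem_ofList _ _).mp hb.1, ha.2, hb.2, hne⟩

theorem hasTwo_eq (lst1 : List String) (x : String) :
    pvHasTwoCommon (PySem.Set.ofList (lst1.map String.toList)) x = pvCondA x lst1 := by
  unfold pvHasTwoCommon pvCondA
  rw [stream_eq_card]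

theorem slotB_eq (lst1 : List String) (Ax : Option (List String)) :
    pvSlotHitB (PySem.Set.ofList (lst1.map String.toList)) Ax = pvSlotHit Ax lst1 := by
  cases Ax with
  | none => rfl
  | some l =>
    show (PySem.List.slice l none (some 5)).any
        (pvHasTwoCommon (PySem.Set.ofList (lst1.map String.toList))) = _
    rw [PySem.List.slice_to l (by norm_num : (0:Int) ≤ 5)]
    show (l.take 5).any (fun x => pvHasTwoCommon (PySem.Set.ofList (lst1.map String.toList)) x) = _
    simp only [hasTwo_eq]
    rfl

theorem pvW_getElem? (j : Nat) (lc : String) (b : Bool) (l : List String) (i : Nat) :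
    (pvW j lc b l)[i]? = if b = true ∧ j = i ∧ i < l.length then some lc else l[i]? := by
  cases b <;> simp [pvW, PySem.List.pySetD_natCast, List.getElem?_set]
  split_ifs <;> simp_all

theorem alt_map_eq_W (A : List String) (lc : String) (h0 h1 h2 h3 : Bool) :
    (PySem.List.enumerate A 0).map (fun p => if decide (p.1 < 4) && pvHitSel (h0, h1, h2, h3) p.1 then lc else p.2)
      = pvW 3 lc h3 (pvW 2 lc h2 (pvW 1 lc h1 (pvW 0 lc h0 A))) := by
  have hlen : ∀ (j : Nat) (b : Bool) (l : List String), (pvW j lc b l).length = l.length := by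
    intro j b l; cases b <;> simp [pvW, PySem.List.pySetD_natCast]
  apply List.ext_getElem?
  intro i
  rw [List.getElem?_map, PySem.List.getElem?_enumerate]
  rw [pvW_getElem?, pvW_getElem?, pvW_getElem?, pvW_getElem?]
  simp only [hlen]
  by_cases hi : i < A.length
  · rw [List.getElem?_eq_getElem hi]
    match i, hi with
    | 0, h => simp [pvHitSel, h]; split_ifs <;> rfl
    | 1, h => simp [pvHitSel, h]; split_ifs <;> rfl
    | 2, h => simp [pvHitSel, h]; split_ifs <;> rfl
    | 3, h => simp [pvHitSel, h]; split_ifs <;> rfl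
    | (n+4), _ =>
      have h4 : ¬ ((((n:Int)+4) < 4)) := by omega
      simp [pvHitSel, h4]
  · rw [List.getElem?_eq_none (by omega)]
    simp [hi]

theorem alt_eq_W (A : List String) (A1 A2 A3 A4 : Option (List String)) (lst1 : List String) (lc : String) :
    update_alt A A1 A2 A3 A4 lst1 lc =
      pvW 3 lc (pvSlotHit A4 lst1)
        (pvW 2 lc (pvSlotHit A3 lst1)
          (pvW 1 lc (pvSlotHit A2 lst1)
            (pvW 0 lc (pvSlotHit A1 lst1) A))) := by
  show (PySem.List.enumerate A 0).map (fun p =>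
      if decide (p.1 < 4) && pvHitSel
        (pvSlotHitB (PySem.Set.ofList (lst1.map String.toList)) A1,
         pvSlotHitB (PySem.Set.ofList (lst1.map String.toList)) A2,
         pvSlotHitB (PySem.Set.ofList (lst1.map String.toList)) A3,
         pvSlotHitB (PySem.Set.ofList (lst1.map String.toList)) A4) p.1 then lc else p.2) = _
  rw [slotB_eq, slotB_eq, slotB_eq, slotB_eq, alt_map_eq_W]

-- ===== VERDICT (by name: the statements are the Claim_ definitions above) =====
theorem update_spec : Claim_equal_update := by
  intro A A1 A2 A3 A4 lst1 lc _ _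
  show update A A1 A2 A3 A4 lst1 lc = update_alt A A1 A2 A3 A4 lst1 lc
  rw [update_eq_W, alt_eq_W, any_try_eq_slotHit, any_try_eq_slotHit,
    any_try_eq_slotHit, any_try_eq_slotHit]
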